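-- pv_equiv track=rewrite | github.com/NHadi2000/png2Bitmap | png2bitmap.py | convert_row_to_8bit_groups
-- ===== SOURCE A (Python) =====
-- BIT_TO_MACRO = {i: f"{format(i, '08b').replace('0', '_').replace('1', 'X')}" for i in range(256)}
--
-- def convert_row_to_8bit_groups(row):
--     groups = []
--     byte = 0
--     bit_count = 0
--
--     for pixel in row:
--         bit = 1 if pixel == 0 else 0  # Black -> 1, White -> 0
--         byte = (byte << 1) | bit
--         bit_count += 1
--
--         if bit_count == 8:  # If 8 bits are packed, add to groups
--             groups.append(BIT_TO_MACRO[byte])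
--             byte = 0
--             bit_count = 0
--
--     # Handle remaining bits in the last group (skip leading `_` padding)
--     if bit_count > 0:
--         byte = byte << (8 - bit_count)  # Pad remaining bits with zeros (only at the end)
--         groups.append(BIT_TO_MACRO[byte])
--
--     return groups
-- ===== SOURCE B (Python) =====
-- def convert_row_to_8bit_groups(row):
--     groups = []
--     for i in range(0, len(row), 8):
--         chunk = row[i:i+8]
--         s = ''.join('X' if p == 0 else '_' for p in chunk)
--         groups.append(s + '_' * (8 - len(chunk)))
--     return groups
-- ===== Notes on version B (the rewrite author's own statement) =====
-- stated objective: simpler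
-- what changed: B drops the integer bit-accumulator and the 256-entry BIT_TO_MACRO lookup table and instead walks the row in slices of 8, building each macro string directly from the pixels and right-padding the final short chunk with '_'.
import Mathlib
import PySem

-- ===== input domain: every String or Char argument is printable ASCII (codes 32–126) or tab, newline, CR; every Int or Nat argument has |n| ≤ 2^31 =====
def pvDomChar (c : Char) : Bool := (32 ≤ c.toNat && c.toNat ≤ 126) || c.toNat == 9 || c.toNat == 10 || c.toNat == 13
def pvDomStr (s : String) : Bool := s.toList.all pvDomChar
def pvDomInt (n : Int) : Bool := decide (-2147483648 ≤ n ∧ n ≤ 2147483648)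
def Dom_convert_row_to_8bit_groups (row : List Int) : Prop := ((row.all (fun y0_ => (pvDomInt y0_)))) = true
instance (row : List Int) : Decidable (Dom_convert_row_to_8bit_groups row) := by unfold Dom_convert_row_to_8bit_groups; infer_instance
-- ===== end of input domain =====

-- B replaces A's bit-accumulator and BIT_TO_MACRO table with direct slicing into
-- 8-pixel chunks, building each macro string straight from the pixels (simpler).

-- ===== PORT A =====
-- BIT_TO_MACRO[i] for 0 ≤ i < 256: format(i,'08b') with '0'→'_', '1'→'X'.
-- Exact for the nonnegative bytes A ever looks up (Int / and % agree with Python there).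
def bitToMacro (b : Int) : String :=
  String.mk ((List.range 8).map (fun k => if b / 2 ^ (7 - k) % 2 == 1 then 'X' else '_'))

def stepA (st : List String × Int × Int) (pixel : Int) : List String × Int × Int :=
  let bit : Int := if pixel == 0 then 1 else 0   -- Black -> 1, White -> 0
  let byte := st.2.1 * 2 + bit                   -- byte = (byte << 1) | bit
  let bc := st.2.2 + 1
  if bc == 8 then (st.1 ++ [bitToMacro byte], 0, 0) else (st.1, byte, bc)

def finishA (st : List String × Int × Int) : List String :=
  if st.2.2 > 0 then st.1 ++ [bitToMacro (st.2.1 * 2 ^ (8 - st.2.2).toNat)] else st.1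

def convert_row_to_8bit_groups (row : List Int) : List String :=
  finishA (row.foldl stepA ([], 0, 0))

-- ===== PORT B =====
def macroOf (chunk : List Int) : String :=
  String.mk (chunk.map (fun p => if p == 0 then 'X' else '_') ++ List.replicate (8 - chunk.length) '_')

def convert_row_to_8bit_groups_alt : List Int → List String
  | [] => []
  | x :: xs => macroOf ((x :: xs).take 8) :: convert_row_to_8bit_groups_alt ((x :: xs).drop 8)
  termination_by row => row.length
  decreasing_by simp

-- ===== PRECONDITION & SPEC =====
def Spec_convert_row_to_8bit_groups (row : List Int) (out : List String) : Prop := out = convert_row_to_8bit_groups_alt row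
instance (row : List Int) (out : List String) : Decidable (Spec_convert_row_to_8bit_groups row out) := by unfold Spec_convert_row_to_8bit_groups; infer_instance

-- ===== CLAIM (what is proved, stated in full; the proofs are below) =====
def Claim_equal_convert_row_to_8bit_groups : Prop := ∀ (row : List Int), Dom_convert_row_to_8bit_groups row → Spec_convert_row_to_8bit_groups row (convert_row_to_8bit_groups row)

-- ===== LEMMAS AND PROOFS =====

lemma alt_nil : convert_row_to_8bit_groups_alt [] = [] := by
  unfold convert_row_to_8bit_groups_alt
  rfl

lemma alt_cons (x : Int) (xs : List Int) :
    convert_row_to_8bit_groups_alt (x :: xs) =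
      macroOf ((x :: xs).take 8) :: convert_row_to_8bit_groups_alt ((x :: xs).drop 8) := by
  conv_lhs => unfold convert_row_to_8bit_groups_alt

-- the bit corresponding to one pixel, and the byte value of a bit list
def pixBit (x : Int) : Int := if x == 0 then 1 else 0
def bits (p : List Int) : List Int := p.map pixBit
def encB (bs : List Int) : Int := bs.foldl (fun a b => 2 * a + b) 0

lemma encB_append (bs cs : List Int) :
    encB (bs ++ cs) = cs.foldl (fun a b => 2 * a + b) (encB bs) := by
  simp [encB, List.foldl_append]

lemma encB_snoc (bs : List Int) (b : Int) : encB (bs ++ [b]) = 2 * encB bs + b := by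
  simp [encB_append]

lemma encB_pad (bs : List Int) (m : ℕ) :
    encB (bs ++ List.replicate m 0) = encB bs * 2 ^ m := by
  induction m generalizing bs with
  | zero => simp
  | succ n ih =>
      have h : bs ++ List.replicate (n+1) 0 = (bs ++ [0]) ++ List.replicate n 0 := by
        simp [List.replicate_succ]
      rw [h, ih, encB_snoc]; ring

lemma bits_snoc (p : List Int) (x : Int) : bits (p ++ [x]) = bits p ++ [pixBit x] := by
  simp [bits]

lemma bits_mem (p : List Int) : ∀ b ∈ bits p, b = 0 ∨ b = 1 := by
  intro b hb
  rcases List.mem_map.1 hb with ⟨x, _, rfl⟩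
  by_cases hx : x = 0 <;> simp [pixBit, hx]

lemma M8 (bs : List Int) (hl : bs.length = 8) (hb : ∀ b ∈ bs, b = 0 ∨ b = 1) :
    bitToMacro (encB bs) = String.mk (bs.map (fun b => if b == 1 then 'X' else '_')) := by
  match bs, hl with
  | [b0, b1, b2, b3, b4, b5, b6, b7], _ =>
    simp only [List.mem_cons, List.not_mem_nil, or_false, forall_eq_or_imp, forall_eq] at hb
    obtain ⟨h0, h1, h2, h3, h4, h5, h6, h7⟩ := hb
    rcases h0 with rfl | rfl <;> rcases h1 with rfl | rfl <;> rcases h2 with rfl | rfl <;>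
      rcases h3 with rfl | rfl <;> rcases h4 with rfl | rfl <;> rcases h5 with rfl | rfl <;>
      rcases h6 with rfl | rfl <;> rcases h7 with rfl | rfl <;> decide

lemma bitChars (p : List Int) :
    (bits p).map (fun b => if b == 1 then 'X' else '_') =
      p.map (fun x => if x == 0 then 'X' else '_') := by
  simp only [bits, List.map_map]
  apply List.map_congr_left
  intro x _
  by_cases hx : x = 0 <;> simp [pixBit, hx]

lemma macro_full (p : List Int) (h : p.length = 8) :
    bitToMacro (encB (bits p)) = macroOf p := by
  rw [M8 _ (by simp [bits, h]) (bits_mem p)]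
  unfold macroOf
  rw [h]
  simp only [Nat.sub_self, List.replicate_zero, List.append_nil]
  exact congrArg String.mk (bitChars p)

lemma macro_pad (p : List Int) (h : p.length ≤ 8) :
    bitToMacro (encB (bits p) * 2 ^ (8 - p.length)) = macroOf p := by
  rw [← encB_pad]
  have h8 : ((bits p) ++ List.replicate (8 - p.length) 0).length = 8 := by
    simp [bits]; omega
  rw [M8 _ h8 ?side]
  case side =>
    intro b hb
    rcases List.mem_append.1 hb with hm | hm
    · exact bits_mem p b hm
    · left; exact List.eq_of_mem_replicate hm
  · unfold macroOf
    congr 1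
    rw [List.map_append, List.map_replicate, bitChars]
    simp

-- the main loop invariant: partial chunk p (|p| < 8) already folded into the state
lemma loop_inv (row : List Int) : ∀ (p : List Int) (groups : List String), p.length < 8 →
    finishA (row.foldl stepA (groups, encB (bits p), (p.length : Int))) =
      groups ++ (if p = [] then convert_row_to_8bit_groups_alt row
                 else macroOf (p ++ row.take (8 - p.length)) ::
                      convert_row_to_8bit_groups_alt (row.drop (8 - p.length))) := by
  induction row with
  | nil =>
      intro p groups hp
      by_cases hp0 : p = []
      · subst hp0
        simp [finishA, encB, bits, alt_nil]
      · have hpos : 0 < p.length := List.length_pos_iff.2 hp0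
        simp only [List.foldl_nil, List.take_nil, List.drop_nil, List.append_nil, if_neg hp0]
        show (if ((p.length : Int) > 0) then _ else _) = _
        rw [if_pos (by exact_mod_cast hpos)]
        have ht : ((8 : Int) - (p.length : Int)).toNat = 8 - p.length := by omega
        show groups ++ [bitToMacro (encB (bits p) * 2 ^ ((8 : Int) - (p.length : Int)).toNat)] = _
        rw [ht, macro_pad p (by omega), alt_nil]
  | cons x xs ih =>
      intro p groups hp
      have hstep : stepA (groups, encB (bits p), (p.length : Int)) x =
          if p.length + 1 = 8 then (groups ++ [bitToMacro (encB (bits (p ++ [x])))], 0, 0)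
          else (groups, encB (bits (p ++ [x])), ((p ++ [x]).length : Int)) := by
        have hby : encB (bits p) * 2 + (if x == 0 then (1:Int) else 0) = encB (bits (p ++ [x])) := by
          rw [bits_snoc, encB_snoc]; simp [pixBit]; ring
        show (if ((p.length : Int) + 1 == 8) then _ else _) = _
        by_cases h8 : p.length + 1 = 8
        · rw [if_pos (by simp; exact_mod_cast h8), if_pos h8, ← hby]
        · rw [if_neg (by simp; intro hc; exact h8 (by exact_mod_cast hc)), if_neg h8, ← hby]
          simp
      rw [List.foldl_cons, hstep]
      by_cases h8 : p.length + 1 = 8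
      · rw [if_pos h8]
        have h7 : p.length = 7 := by omega
        have hp0 : p ≠ [] := List.ne_nil_of_length_pos (by omega)
        have hone := ih [] (groups ++ [bitToMacro (encB (bits (p ++ [x])))]) (by simp)
        rw [show bits ([] : List Int) = [] from rfl, show encB [] = (0 : Int) from rfl,
            show (([] : List Int).length : Int) = 0 from rfl, if_pos rfl] at hone
        rw [hone, macro_full (p ++ [x]) (by simp [h7]), if_neg hp0, h7]
        simp
      · rw [if_neg h8]
        have hrec := ih (p ++ [x]) groups (by simp; omega)
        rw [hrec, if_neg (by simp)]
        by_cases hp0 : p = []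
        · subst hp0
          simp only [List.nil_append, List.length_cons, List.length_nil]
          rw [alt_cons]
          norm_num
        · rw [if_neg hp0]
          obtain ⟨n, hn⟩ : ∃ n, 8 - p.length = n + 1 := ⟨8 - p.length - 1, by omega⟩
          have harr : 8 - (p ++ [x]).length = n := by simp; omega
          rw [hn, harr, List.take_succ_cons, List.drop_succ_cons]
          simp

-- ===== VERDICT (by name: the statement is the Claim_ definition above) =====
theorem convert_row_to_8bit_groups_spec : Claim_equal_convert_row_to_8bit_groups := by
  intro row _
  unfold Spec_convert_row_to_8bit_groups convert_row_to_8bit_groups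
  have h := loop_inv row [] [] (by simp)
  rw [show bits ([] : List Int) = [] from rfl, show encB [] = (0 : Int) from rfl,
      show (([] : List Int).length : Int) = 0 from rfl, if_pos rfl] at h
  simpa using h
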